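-- pv_equiv track=rewrite | github.com/hmanprod/fleetmada | .kiro/skills/product-qa-auditor/scripts/exploration_engine.py | plan_interactions
-- ===== SOURCE A (Python) =====
-- from typing import Dict, List, Any, Optional
--
-- def plan_interactions(elements: List[Dict[str, Any]]) -> List[str]:
--     """Plan interaction sequence for current page"""
--     interactions = []
--
--     # Fill form fields first
--     for element in elements:
--         if element.get("type") == "input":
--             interactions.append(f"agent-browser fill @e{element['id']} \"test_value\"")
--
--     # Then click buttons and links
--     for element in elements:
--         if element.get("type") in ["button", "link"]:
--             interactions.append(f"agent-browser click @e{element['id']}")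
--
--     return interactions
-- ===== SOURCE B (Python) =====
-- def plan_interactions(elements):
--     """Plan interaction sequence for current page (single partitioning pass)."""
--     fills = []
--     clicks = []
--     for element in elements:
--         t = element.get("type")
--         if t == "input":
--             fills.append(f"agent-browser fill @e{element['id']} \"test_value\"")
--         elif t in ("button", "link"):
--             clicks.append(f"agent-browser click @e{element['id']}")
--     return fills + clicks
-- ===== Notes on version B (the rewrite author's own statement) =====
-- stated objective: simpler
-- what changed: Replaces A's two sequential scans over elements with a single partitioning pass that accumulates fill and click commands in two lists and concatenates them; Pre_ excludes elements of type input/button/link that lack an 'id' key, on which both A and B raise KeyError.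
import Mathlib
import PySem

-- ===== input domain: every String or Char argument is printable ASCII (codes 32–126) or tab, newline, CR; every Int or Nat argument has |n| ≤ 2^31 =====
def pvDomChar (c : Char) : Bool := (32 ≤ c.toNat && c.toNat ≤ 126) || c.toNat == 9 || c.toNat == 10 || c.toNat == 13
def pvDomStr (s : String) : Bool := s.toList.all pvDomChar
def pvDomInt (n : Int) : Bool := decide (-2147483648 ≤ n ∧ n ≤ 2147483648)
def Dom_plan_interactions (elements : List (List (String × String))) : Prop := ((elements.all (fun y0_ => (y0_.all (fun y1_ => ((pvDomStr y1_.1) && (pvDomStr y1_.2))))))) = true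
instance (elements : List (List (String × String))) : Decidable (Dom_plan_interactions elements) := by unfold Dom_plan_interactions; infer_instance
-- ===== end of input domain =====

-- B replaces A's two sequential scans with a single partitioning pass (two accumulator lists, concatenated); same commands, same order.


-- element.get(k): first match in the association list (Python dicts have unique keys)
def pvGetKey? (e : List (String × String)) (k : String) : Option String :=
  (e.find? (fun p => p.1 == k)).map (·.2)

-- element['id']; Pre_ guarantees the key is present wherever this is reached
def pvIdOf (e : List (String × String)) : String :=
  (pvGetKey? e "id").getD ""

def pvFillCmd (e : List (String × String)) : String :=
  "agent-browser fill @e" ++ pvIdOf e ++ " \"test_value\""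

def pvClickCmd (e : List (String × String)) : String :=
  "agent-browser click @e" ++ pvIdOf e

-- ===== PORT A =====
def plan_interactions (elements : List (List (String × String))) : List String :=
  -- first loop: fill form fields
  let interactions := elements.foldl (fun acc element =>
    if pvGetKey? element "type" = some "input" then acc ++ [pvFillCmd element] else acc) []
  -- second loop: click buttons and links
  elements.foldl (fun acc element =>
    if pvGetKey? element "type" = some "button" ∨ pvGetKey? element "type" = some "link" then
      acc ++ [pvClickCmd element]
    else acc) interactions

-- ===== PORT B =====
def pvStepB (p : List String × List String) (element : List (String × String)) :
    List String × List String :=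
  let t := pvGetKey? element "type"
  if t = some "input" then (p.1 ++ [pvFillCmd element], p.2)
  else if t = some "button" ∨ t = some "link" then (p.1, p.2 ++ [pvClickCmd element])
  else p

def plan_interactions_alt (elements : List (List (String × String))) : List String :=
  let p := elements.foldl pvStepB ([], [])
  p.1 ++ p.2

-- ===== PRECONDITION & SPEC =====
-- Pre_ excludes exactly the inputs on which Python A raises KeyError: an element whose
-- type is 'input', 'button' or 'link' but which has no 'id' key.
def Pre_plan_interactions (elements : List (List (String × String))) : Prop :=
  ∀ e ∈ elements,
    (pvGetKey? e "type" = some "input" ∨ pvGetKey? e "type" = some "button" ∨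
     pvGetKey? e "type" = some "link") → (pvGetKey? e "id").isSome = true
instance (elements : List (List (String × String))) : Decidable (Pre_plan_interactions elements) := by
  unfold Pre_plan_interactions; infer_instance

def pvWitness_plan_interactions : (List (List (String × String))) :=
  [[("type", "input"), ("id", "1")], [("type", "button"), ("id", "2")], [("type", "div")]]

def Spec_plan_interactions (elements : List (List (String × String))) (out : List String) : Prop := out = plan_interactions_alt elements
instance (elements : List (List (String × String))) (out : List String) : Decidable (Spec_plan_interactions elements out) := by unfold Spec_plan_interactions; infer_instance

-- ===== CLAIM (what is proved, stated in full; the proofs are below) =====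
def Claim_equal_plan_interactions : Prop := ∀ (elements : List (List (String × String))), Dom_plan_interactions elements → Pre_plan_interactions elements → Spec_plan_interactions elements (plan_interactions elements)

-- ===== LEMMAS AND PROOFS =====

def pvFillsOf (e : List (String × String)) : List String :=
  if pvGetKey? e "type" = some "input" then [pvFillCmd e] else []

def pvClicksOf (e : List (String × String)) : List String :=
  if pvGetKey? e "type" = some "button" ∨ pvGetKey? e "type" = some "link" then [pvClickCmd e] else []

theorem loopA_fill (elements : List (List (String × String))) (acc : List String) :
    elements.foldl (fun acc element =>
      if pvGetKey? element "type" = some "input" then acc ++ [pvFillCmd element] else acc) acc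
    = acc ++ elements.flatMap pvFillsOf := by
  induction elements generalizing acc with
  | nil => simp
  | cons e es ih =>
    simp only [List.foldl_cons, List.flatMap_cons, ih, pvFillsOf]
    split_ifs <;> simp

theorem loopA_click (elements : List (List (String × String))) (acc : List String) :
    elements.foldl (fun acc element =>
      if pvGetKey? element "type" = some "button" ∨ pvGetKey? element "type" = some "link" then
        acc ++ [pvClickCmd element]
      else acc) acc
    = acc ++ elements.flatMap pvClicksOf := by
  induction elements generalizing acc with
  | nil => simp
  | cons e es ih =>
    simp only [List.foldl_cons, List.flatMap_cons, ih, pvClicksOf]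
    split_ifs <;> simp

theorem loopB (elements : List (List (String × String))) (p : List String × List String) :
    elements.foldl pvStepB p
    = (p.1 ++ elements.flatMap pvFillsOf, p.2 ++ elements.flatMap pvClicksOf) := by
  induction elements generalizing p with
  | nil => simp
  | cons e es ih =>
    simp only [List.foldl_cons, List.flatMap_cons, ih, pvStepB, pvFillsOf, pvClicksOf]
    split_ifs with h1 h2 <;> simp_all

-- ===== VERDICT (by name: the statement is the Claim_ definition above) =====
theorem plan_interactions_spec : Claim_equal_plan_interactions := by
  intro elements _ _
  unfold Spec_plan_interactions plan_interactions plan_interactions_alt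
  rw [loopA_fill, loopA_click, loopB]
  simp
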